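-- pv_equiv track=rewrite | github.com/YourHealer/NLP-Dictionary-based-segmentation-method | 史桠彬-1120201198-大作业一/代码/BigHomework1/wordAttrMark.py | get_percent
-- ===== SOURCE A (Python) =====
-- def get_percent(sents):
--     percent = dict()
--     for sent in sents:
--         for word in sent:
--             word_word = word.split('/')[0].split('{')[0].strip('[')
--             word_part = word.split('/')[-1].split(']')[0].split('!')[0]
--             if word_word in percent:
--                 if word_part in percent[word_word]:
--                     percent[word_word][word_part] += 1
--                 else:
--                     percent[word_word][word_part] = 1
--             else:
--                 percent[word_word] = dict()
--                 percent[word_word][word_part] = 1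
--     return percent
-- ===== SOURCE B (Python) =====
-- def get_percent(sents):
--     # flatten all words to (word_word, word_part) pairs once
--     pairs = [(w.split('/')[0].split('{')[0].strip('['),
--               w.split('/')[-1].split(']')[0].split('!')[0])
--              for sent in sents for w in sent]
--     # group-by-and-count: for each distinct word_word (first-seen order),
--     # collect its parts and count each distinct part with list.count
--     return {ww: {wp: parts.count(wp) for wp in dict.fromkeys(parts)}
--             for ww in dict.fromkeys(ww for ww, _ in pairs)
--             for parts in [[wp for w2, wp in pairs if w2 == ww]]}
-- ===== Notes on version B (the rewrite author's own statement) =====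
-- stated objective: alternative
-- what changed: Replaces A's single-pass accumulation into a nested dict (membership tests and in-place += while scanning) by a declarative group-by-and-count: flatten everything to (word,part) pairs once, then for each distinct word (first-seen order via dict.fromkeys) filter out its parts and count each distinct part with list.count — no incremental counters at all.
import Mathlib
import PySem

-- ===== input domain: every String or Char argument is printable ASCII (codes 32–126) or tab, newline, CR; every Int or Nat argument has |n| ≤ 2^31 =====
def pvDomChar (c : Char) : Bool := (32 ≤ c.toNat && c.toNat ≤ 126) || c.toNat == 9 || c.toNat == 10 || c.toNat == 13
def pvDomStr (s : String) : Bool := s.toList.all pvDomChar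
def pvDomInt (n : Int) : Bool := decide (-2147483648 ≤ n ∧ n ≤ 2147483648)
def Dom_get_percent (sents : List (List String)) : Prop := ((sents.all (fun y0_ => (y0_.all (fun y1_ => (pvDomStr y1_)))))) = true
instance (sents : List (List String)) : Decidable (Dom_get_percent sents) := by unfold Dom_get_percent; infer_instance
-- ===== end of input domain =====

-- B replaces A's single-pass nested-dict accumulation by a declarative group-by-and-count over a
-- flat (word, part) pair list: dedup the words, filter each word's parts, count with list.count.

-- s.split(sep) for a non-empty literal sep (PySem.Str.split? is none only for sep = "")
def pySplit (s sep : String) : List String := (PySem.Str.split? s sep).getD []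

-- word.split('/')[0].split('{')[0].strip('[')
def pvWW (word : String) : String :=
  PySem.Str.stripChars ((pySplit ((pySplit word "/").headD "") "{").headD "") "["
-- word.split('/')[-1].split(']')[0].split('!')[0]   (split results are never empty, so [0]/[-1] never raise)
def pvWP (word : String) : String :=
  (pySplit ((pySplit ((pySplit word "/").getLastD "") "]").headD "") "!").headD ""

-- ===== PORT A =====
-- the body of A's inner loop: branch on presence of word_word and word_part
def pvStepA (percent : PySem.Dict String (PySem.Dict String Int)) (word : String) :
    PySem.Dict String (PySem.Dict String Int) :=
  let word_word := pvWW word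
  let word_part := pvWP word
  match percent.get? word_word with
  | some inner =>
    match inner.get? word_part with
    | some c => percent.insert word_word (inner.insert word_part (c + 1))
    | none   => percent.insert word_word (inner.insert word_part 1)
  | none => percent.insert word_word ((PySem.Dict.empty).insert word_part 1)

def get_percent (sents : List (List String)) : List (String × List (String × Int)) :=
  let percent := sents.foldl (fun percent sent => sent.foldl pvStepA percent)
    (PySem.Dict.empty : PySem.Dict String (PySem.Dict String Int))
  percent.items.map (fun kv => (kv.1, kv.2.items))

-- ===== PORT B =====
-- pairs = [(ww(w), wp(w)) for sent in sents for w in sent]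
def pvPairs (sents : List (List String)) : List (String × String) :=
  sents.flatMap (fun sent => sent.map (fun w => (pvWW w, pvWP w)))

-- parts = [wp for w2, wp in pairs if w2 == ww]
def pvParts (pairs : List (String × String)) (ww : String) : List String :=
  (pairs.filter (fun q => q.1 == ww)).map Prod.snd

-- {wp: parts.count(wp) for wp in dict.fromkeys(parts)}
def pvInnerB (parts : List String) : List (String × Int) :=
  (PySem.List.dedup parts).map (fun wp => (wp, (PySem.List.count parts wp : Int)))

def get_percent_alt (sents : List (List String)) : List (String × List (String × Int)) :=
  let pairs := pvPairs sents
  (PySem.List.dedup (pairs.map Prod.fst)).map (fun ww => (ww, pvInnerB (pvParts pairs ww)))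

-- ===== PRECONDITION & SPEC =====
def Spec_get_percent (sents : List (List String)) (out : List (String × List (String × Int))) : Prop := out = get_percent_alt sents
instance (sents : List (List String)) (out : List (String × List (String × Int))) : Decidable (Spec_get_percent sents out) := by unfold Spec_get_percent; infer_instance

-- ===== CLAIM (what is proved, stated in full; the proofs are below) =====
def Claim_equal_get_percent : Prop := ∀ (sents : List (List String)), Dom_get_percent sents → Spec_get_percent sents (get_percent sents)

-- ===== LEMMAS AND PROOFS =====

-- the abstract form of A's loop body, acting on an already-parsed pair
def pvAStep (d : PySem.Dict String (PySem.Dict String Int)) (p : String × String) :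
    PySem.Dict String (PySem.Dict String Int) :=
  let inner := d.getD p.1 PySem.Dict.empty
  d.insert p.1 (inner.insert p.2 (inner.getD p.2 0 + 1))

theorem pvStepA_eq (d : PySem.Dict String (PySem.Dict String Int)) (w : String) :
    pvStepA d w = pvAStep d (pvWW w, pvWP w) := by
  rcases hww : d.get? (pvWW w) with _ | inner
  · simp only [pvStepA, pvAStep, PySem.Dict.getD, hww, Option.getD_none, PySem.Dict.get?_empty]
    norm_num
  · rcases hwp : inner.get? (pvWP w) with _ | c
    · simp only [pvStepA, pvAStep, PySem.Dict.getD, hww, hwp, Option.getD_some, Option.getD_none]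
      norm_num
    · simp only [pvStepA, pvAStep, PySem.Dict.getD, hww, hwp, Option.getD_some]

-- the outer dict after processing a flat pair list, in B's group-by-and-count shape
def pvGd (pairs : List (String × String)) : PySem.Dict String (PySem.Dict String Int) :=
  PySem.Dict.mk ((PySem.List.dedup (pairs.map Prod.fst)).map
    (fun a => (a, PySem.Dict.mk (pvInnerB (pvParts pairs a)))))

theorem pvDedup_append_singleton {α : Type} [BEq α] (l : List α) (x : α) :
    PySem.List.dedup (l ++ [x]) = PySem.Set.add (PySem.List.dedup l) x := by
  simp [PySem.List.dedup, PySem.Set.ofList_eq_foldl, List.foldl_append]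

theorem pvParts_append (ps : List (String × String)) (p : String × String) (a : String) :
    pvParts (ps ++ [p]) a = pvParts ps a ++ (if p.1 = a then [p.2] else []) := by
  simp only [pvParts, List.filter_append, List.map_append]
  by_cases h : p.1 = a
  · subst h; simp [List.filter]
  · have hb : (p.1 == a) = false := by simpa using h
    simp [List.filter, hb, h]

theorem pvParts_eq_nil (ps : List (String × String)) (a : String)
    (h : a ∉ ps.map Prod.fst) : pvParts ps a = [] := by
  simp only [pvParts, List.map_eq_nil_iff, List.filter_eq_nil_iff]
  intro q hq hqa
  have hq1 : q.1 = a := by simpa using hqa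
  exact h (hq1 ▸ List.mem_map_of_mem (f := Prod.fst) hq)

-- keys of the group-by dict are exactly the deduped words
theorem pvGd_keys (ps : List (String × String)) :
    (pvGd ps).keys = PySem.List.dedup (ps.map Prod.fst) := by
  simp [pvGd, PySem.Dict.keys, List.map_map, Function.comp_def]

theorem pvGd_contains (ps : List (String × String)) (a : String) :
    (pvGd ps).contains a = (ps.map Prod.fst).contains a := by
  rcases h : (ps.map Prod.fst).contains a with _ | _
  · have : a ∉ ps.map Prod.fst := by simpa using h
    rw [← Bool.not_eq_true]
    rw [PySem.Dict.contains_iff_mem_keys, pvGd_keys]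
    simp only [PySem.List.dedup]
    rw [PySem.Set.mem_ofList]
    simpa using this
  · have : a ∈ ps.map Prod.fst := by simpa using h
    rw [(PySem.Dict.contains_iff_mem_keys _ _).2]
    rw [pvGd_keys]
    simp only [PySem.List.dedup]
    rw [PySem.Set.mem_ofList]
    exact this

theorem pvGd_getD (ps : List (String × String)) (a : String) (h : a ∈ ps.map Prod.fst) :
    (pvGd ps).getD a PySem.Dict.empty = PySem.Dict.mk (pvInnerB (pvParts ps a)) := by
  apply PySem.Dict.getD_of_mem_items
  · simp only [pvGd, PySem.Dict.items]
    exact List.mem_map_of_mem (by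
      simp only [PySem.List.dedup]; exact (PySem.Set.mem_ofList _ _).2 h)
  · rw [pvGd_keys]
    exact PySem.Set.nodup_ofList _

-- inner-level step: counting one more part b = inserting count+1 into the counted dict
theorem pvInnerB_append (l : List String) (b : String) :
    pvInnerB (l ++ [b]) =
      ((PySem.Dict.mk (pvInnerB l)).insert b
        ((PySem.Dict.mk (pvInnerB l)).getD b 0 + 1)).items := by
  have hkeys : (PySem.Dict.mk (pvInnerB l)).keys = PySem.List.dedup l := by
    simp [pvInnerB, PySem.Dict.keys, List.map_map, Function.comp_def]
  have hcontains : (PySem.Dict.mk (pvInnerB l)).contains b = l.contains b := by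
    rcases h : l.contains b with _ | _
    · rw [← Bool.not_eq_true, PySem.Dict.contains_iff_mem_keys, hkeys]
      simp only [PySem.List.dedup]
      rw [PySem.Set.mem_ofList]
      simpa using h
    · rw [(PySem.Dict.contains_iff_mem_keys _ _).2]
      rw [hkeys]
      simp only [PySem.List.dedup]
      rw [PySem.Set.mem_ofList]
      simpa using h
  by_cases hb : b ∈ l
  · -- b already counted: the dedup list is unchanged, the count at b bumps by one
    have hc : (PySem.Dict.mk (pvInnerB l)).contains b = true := by
      rw [hcontains]; simpa using hb
    have hgd : (PySem.Dict.mk (pvInnerB l)).getD b 0 = (PySem.List.count l b : Int) := by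
      apply PySem.Dict.getD_of_mem_items
      · exact List.mem_map_of_mem (by
          simp only [PySem.List.dedup]; exact (PySem.Set.mem_ofList _ _).2 hb)
      · rw [hkeys]; exact PySem.Set.nodup_ofList _
    rw [hgd, PySem.Dict.items_insert_of_contains _ _ hc]
    have hded : PySem.List.dedup (l ++ [b]) = PySem.List.dedup l := by
      rw [pvDedup_append_singleton, PySem.Set.add]
      rw [if_pos (by
        simp only [PySem.List.dedup, PySem.Set.contains]
        simpa using (PySem.Set.mem_ofList l b).2 hb)]
    simp only [pvInnerB, hded, PySem.Dict.items, List.map_map]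
    apply List.map_congr_left
    intro x hx
    by_cases hxb : x = b
    · subst hxb
      simp [PySem.List.count, List.count_append]
    · simp only [Function.comp]
      rw [if_neg (by simpa using hxb)]
      simp only [PySem.List.count]
      rw [List.count_append]
      simp [List.count_singleton, Ne.symm hxb]
  · -- new part: dedup gains b at the end, its count is 1
    have hc : (PySem.Dict.mk (pvInnerB l)).contains b = false := by
      rw [hcontains]; simpa using hb
    rw [PySem.Dict.getD_of_not_contains _ _ hc,
      PySem.Dict.items_insert_of_not_contains _ _ hc]
    have hded : PySem.List.dedup (l ++ [b]) = PySem.List.dedup l ++ [b] := by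
      rw [pvDedup_append_singleton, PySem.Set.add]
      rw [if_neg (by
        simp only [PySem.List.dedup, PySem.Set.contains, Bool.not_eq_true]
        rw [← Bool.not_eq_true]
        intro hcontr
        exact hb (by simpa using ((PySem.Set.mem_ofList l b).1 (by simpa using hcontr))))]
    simp only [pvInnerB, hded, List.map_append, List.map_cons, List.map_nil, PySem.Dict.items]
    congr 1
    · apply List.map_congr_left
      intro x hx
      have hxl : x ∈ l := (PySem.Set.mem_ofList l x).1 hx
      have hxb : x ≠ b := fun h => hb (h ▸ hxl)
      simp only [PySem.List.count]
      rw [List.count_append]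
      simp [List.count_singleton, Ne.symm hxb]
    · have : l.count b = 0 := List.count_eq_zero.2 hb
      simp [PySem.List.count, List.count_append, this]

-- outer-level step: one pvAStep on the group-by dict = one more pair in the flat list
theorem pvGd_step (ps : List (String × String)) (p : String × String) :
    pvAStep (pvGd ps) p = pvGd (ps ++ [p]) := by
  obtain ⟨a, b⟩ := p
  by_cases ha : a ∈ ps.map Prod.fst
  · -- word already present: its inner dict is bumped, everything else unchanged
    have hc : (pvGd ps).contains a = true := by
      rw [pvGd_contains]; simpa using ha
    have hded : PySem.List.dedup ((ps ++ [(a, b)]).map Prod.fst)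
        = PySem.List.dedup (ps.map Prod.fst) := by
      rw [List.map_append]
      simp only [List.map_cons, List.map_nil]
      rw [pvDedup_append_singleton, PySem.Set.add]
      rw [if_pos (by
        simp only [PySem.List.dedup, PySem.Set.contains]
        simpa using (PySem.Set.mem_ofList (ps.map Prod.fst) a).2 ha)]
    apply PySem.Dict.ext
    simp only [pvAStep]
    rw [pvGd_getD ps a ha, PySem.Dict.items_insert_of_contains _ _ hc]
    simp only [pvGd, PySem.Dict.items, hded, List.map_map]
    apply List.map_congr_left
    intro x hx
    by_cases hxa : x = a
    · subst hxa
      simp only [Function.comp, beq_self_eq_true, if_pos]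
      congr 1
      apply PySem.Dict.ext
      have hp : pvParts (ps ++ [(x, b)]) x = pvParts ps x ++ [b] := by
        rw [pvParts_append]; simp
      show _ = pvInnerB (pvParts (ps ++ [(x, b)]) x)
      rw [hp, pvInnerB_append]
    · simp only [Function.comp]
      rw [if_neg (by simpa using hxa)]
      rw [pvParts_append]
      simp [Ne.symm hxa]
  · -- new word: a fresh singleton inner dict is appended
    have hc : (pvGd ps).contains a = false := by
      rw [pvGd_contains]; simpa using ha
    have hded : PySem.List.dedup ((ps ++ [(a, b)]).map Prod.fst)
        = PySem.List.dedup (ps.map Prod.fst) ++ [a] := by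
      rw [List.map_append]
      simp only [List.map_cons, List.map_nil]
      rw [pvDedup_append_singleton, PySem.Set.add]
      rw [if_neg (by
        simp only [PySem.List.dedup, PySem.Set.contains, Bool.not_eq_true]
        rw [← Bool.not_eq_true]
        intro hcontr
        exact ha (by simpa using ((PySem.Set.mem_ofList (ps.map Prod.fst) a).1
          (by simpa using hcontr))))]
    apply PySem.Dict.ext
    simp only [pvAStep]
    rw [PySem.Dict.getD_of_not_contains _ _ hc,
      PySem.Dict.items_insert_of_not_contains _ _ hc]
    simp only [pvGd, PySem.Dict.items]
    rw [hded]
    simp only [List.map_append, List.map_cons, List.map_nil]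
    congr 1
    · apply List.map_congr_left
      intro x hx
      have hxa : x ≠ a := fun h =>
        ha (h ▸ (PySem.Set.mem_ofList (ps.map Prod.fst) x).1 hx)
      rw [pvParts_append]
      simp [Ne.symm hxa]
    · have hparts : pvParts (ps ++ [(a, b)]) a = [b] := by
        rw [pvParts_append, pvParts_eq_nil ps a ha]
        simp
      rw [hparts]
      simp [pvInnerB, PySem.List.dedup, PySem.Set.ofList_eq_foldl, PySem.Set.add,
        PySem.Set.contains, PySem.List.count, PySem.Dict.insert, PySem.Dict.empty,
        PySem.Dict.contains]
      rfl

theorem pvFoldl_eq_pvGd (ps : List (String × String)) :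
    ps.foldl pvAStep PySem.Dict.empty = pvGd ps := by
  induction ps using List.reverseRecOn with
  | nil => rfl
  | append_singleton l p ih =>
    rw [List.foldl_append, List.foldl_cons, List.foldl_nil, ih, pvGd_step]

-- A's nested loop over sents/words is the fold of pvAStep over the flat pair list
theorem pvNested_eq_flat (sents : List (List String))
    (d : PySem.Dict String (PySem.Dict String Int)) :
    sents.foldl (fun percent sent => sent.foldl pvStepA percent) d
      = (pvPairs sents).foldl pvAStep d := by
  induction sents generalizing d with
  | nil => rfl
  | cons sent sents ih =>
    rw [List.foldl_cons, ih]
    simp only [pvPairs, List.flatMap_cons]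
    rw [List.foldl_append]
    congr 1
    rw [List.foldl_map]
    exact PySem.List.foldl_congr_mem sent _ _ d (fun acc w _ => pvStepA_eq acc w)

-- ===== VERDICT (by name: the statement is the Claim_ definition above) =====
theorem get_percent_spec : Claim_equal_get_percent := by
  intro sents _
  show get_percent sents = get_percent_alt sents
  simp only [get_percent, get_percent_alt]
  rw [pvNested_eq_flat, pvFoldl_eq_pvGd]
  simp [pvGd, List.map_map, Function.comp]
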